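-- pv_equiv track=rewrite | github.com/MohammadSeyedabadi/MohammadSeyedabadi.com | src/posts/posts.py | categorize_tags
-- ===== SOURCE A (Python) =====
-- from collections import defaultdict, OrderedDict
--
-- def categorize_tags(tags, language):
--     """
--     Groups tags into categories based on their first character.
--     For English, uses the uppercase first letter; for Persian, uses the first character.
--     Each category is sorted alphabetically.
--     """
--     tag_categories = defaultdict(list)
--     for tag in tags:
--         if language == 'en':
--             first_char = tag[0].upper() if tag and tag[0].isalpha() else tag[0]
--         else:
--             first_char = tag[0] if tag else ""
--         tag_categories[first_char].append(tag)
--     for key in tag_categories: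
--         tag_categories[key].sort()
--     return dict(tag_categories)
-- ===== SOURCE B (Python) =====
-- def categorize_tags(tags, language):
--     """
--     Groups tags into categories based on their first character.
--     For English, uses the uppercase first letter; for Persian, uses the first character.
--     Each category is sorted alphabetically.
--     """
--     def first_char(tag):
--         if language == 'en':
--             return tag[0].upper() if tag and tag[0].isalpha() else tag[0]
--         return tag[0] if tag else ""
--     keys = list(dict.fromkeys(first_char(tag) for tag in tags))
--     return {k: sorted(tag for tag in tags if first_char(tag) == k) for k in keys}
-- ===== Notes on version B (the rewrite author's own statement) =====
-- stated objective: simpler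
-- what changed: Replaces A's mutate-a-defaultdict-then-sort-each-bucket-in-place loop by a pure two-step pipeline: collect the first-appearance key list with dict.fromkeys, then build the result directly as a comprehension sorting the per-key filter of tags.
import Mathlib
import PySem

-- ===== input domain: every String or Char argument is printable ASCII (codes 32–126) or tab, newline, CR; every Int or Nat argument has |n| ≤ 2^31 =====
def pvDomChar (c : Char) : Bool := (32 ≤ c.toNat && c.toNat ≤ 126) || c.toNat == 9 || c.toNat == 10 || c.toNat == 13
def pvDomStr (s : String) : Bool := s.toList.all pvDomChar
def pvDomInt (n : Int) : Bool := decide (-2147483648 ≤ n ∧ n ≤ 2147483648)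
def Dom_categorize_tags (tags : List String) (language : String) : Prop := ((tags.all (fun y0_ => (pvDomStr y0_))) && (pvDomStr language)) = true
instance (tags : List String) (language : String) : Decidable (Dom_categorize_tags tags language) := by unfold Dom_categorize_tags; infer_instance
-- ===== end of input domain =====

-- B replaces A's mutate-a-defaultdict-then-sort-each-bucket loop by a pure per-key
-- grouping comprehension over the first-appearance key list (objective: simpler).

-- shared helper: both Pythons compute this identical first-character key expression
-- (the `none` arm is Python's IndexError on an empty tag under 'en'; excluded by Pre_)
def pvFirstKey (language tag : String) : String :=
  if language == "en" then
    match PySem.Str.pyGet? tag 0 with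
    | some c => if PySem.Chars.isalpha c then String.ofList [PySem.Chars.upperChar c] else String.ofList [c]
    | none => ""
  else
    match PySem.Str.pyGet? tag 0 with
    | some c => String.ofList [c]
    | none => ""

-- ===== PORT A =====
def categorize_tags (tags : List String) (language : String) : List (String × List String) :=
  ((tags.foldl (fun d tag => d.modify (pvFirstKey language tag) [] (· ++ [tag]))
      (PySem.Dict.empty : PySem.Dict String (List String))).items).map
    (fun p => (p.1, PySem.List.sorted p.2 (fun x => x) false))

-- ===== PORT B =====
def categorize_tags_alt (tags : List String) (language : String) : List (String × List String) :=
  (PySem.List.dedup (tags.map (pvFirstKey language))).map (fun k =>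
    (k, PySem.List.sorted (tags.filter (fun tag => pvFirstKey language tag == k)) (fun x => x) false))

-- ===== PRECONDITION & SPEC =====
-- Pre_ excludes exactly the inputs where Python A raises IndexError: an empty tag with language 'en'.
def Pre_categorize_tags (tags : List String) (language : String) : Prop :=
  language = "en" → ∀ t ∈ tags, t ≠ ""
instance (tags : List String) (language : String) : Decidable (Pre_categorize_tags tags language) := by unfold Pre_categorize_tags; infer_instance

def pvWitness_categorize_tags : List String × String := (["banana", "apple", "!x", "Apple", "b2"], "en")

def Spec_categorize_tags (tags : List String) (language : String) (out : List (String × List String)) : Prop := out = categorize_tags_alt tags language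
instance (tags : List String) (language : String) (out : List (String × List String)) : Decidable (Spec_categorize_tags tags language out) := by unfold Spec_categorize_tags; infer_instance

-- ===== CLAIM (what is proved, stated in full; the proofs are below) =====
def Claim_equal_categorize_tags : Prop := ∀ (tags : List String) (language : String), Dom_categorize_tags tags language → Pre_categorize_tags tags language → Spec_categorize_tags tags language (categorize_tags tags language)

-- ===== LEMMAS AND PROOFS =====

-- the grouping dict built by A's first loop, characterised
theorem pvDict_getD (tags : List String) (language : String) (k : String) :
    (tags.foldl (fun d tag => d.modify (pvFirstKey language tag) [] (· ++ [tag]))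
      (PySem.Dict.empty : PySem.Dict String (List String))).getD k []
      = tags.filter (fun tag => pvFirstKey language tag == k) := by
  have h := PySem.Dict.getD_foldl_modify_append
      (l := tags.map (fun tag => (pvFirstKey language tag, tag)))
      (d := (PySem.Dict.empty : PySem.Dict String (List String))) (c := k)
  rw [List.foldl_map] at h
  rw [h]
  simp [List.filter_map, Function.comp_def, List.map_map]

-- ===== VERDICT (by name: the statement is the Claim_ definition above) =====
theorem categorize_tags_spec : Claim_equal_categorize_tags := by
  intro tags language _hdom _hpre
  show categorize_tags tags language = categorize_tags_alt tags language
  unfold categorize_tags categorize_tags_alt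
  have hnd : (tags.foldl (fun d tag => d.modify (pvFirstKey language tag) [] (· ++ [tag]))
      (PySem.Dict.empty : PySem.Dict String (List String))).keys.Nodup :=
    PySem.Dict.nodup_keys_foldl_modify_key tags (pvFirstKey language) []
      (fun _ tag v => v ++ [tag]) _ PySem.Dict.nodup_keys_empty
  have hkeys : (tags.foldl (fun d tag => d.modify (pvFirstKey language tag) [] (· ++ [tag]))
      (PySem.Dict.empty : PySem.Dict String (List String))).keys
      = PySem.List.dedup (tags.map (pvFirstKey language)) := by
    rw [PySem.Dict.keys_foldl_modify_key tags (pvFirstKey language) []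
      (fun _ tag v => v ++ [tag]) PySem.Dict.empty]
    simp [PySem.Dict.keys_empty, PySem.Set.update_nil_left, PySem.List.dedup_eq_ofList]
  rw [PySem.Dict.items_eq_map_keys _ hnd [], hkeys, List.map_map]
  refine List.map_congr_left ?_
  intro k _
  simp only [Function.comp]
  rw [pvDict_getD]
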